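-- pv_equiv track=rewrite | github.com/NiccoF/NiccoloFCS313 | recursion.py | split_odd10_helper
-- ===== SOURCE A (Python) =====
-- def split_odd10_helper(nums, index, left_list, right_list):
--     """
--     Recursive Helper for split_odd10
--     """
--     if index >= len(nums):
--         if(sum(left_list) % 10 == 0 or sum(right_list) % 10 == 0):
--             if(sum(left_list) % 2 != 0 or sum(left_list) % 2 != 0):
--                 return True
--         return False
--     left_list.append(nums[index])
--     if split_odd10_helper(nums, index + 1, left_list, right_list):
--         return True
--     left_list.pop()
--     right_list.append(nums[index])
--     if split_odd10_helper(nums, index + 1, left_list, right_list):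
--         return True
--     right_list.pop()
--     return False
-- ===== SOURCE B (Python) =====
-- def split_odd10_helper(nums, index, left_list, right_list):
--     # Residue pass: the search succeeds iff some choice of elements from position index on,
--     # added to left_list, makes the left sum odd while the remaining elements make
--     # the right sum divisible by 10 (a left sum divisible by 10 can never be odd).
--     # That only depends on subset sums mod 10, so track the reachable residues.
--     t = sum(right_list)
--     reach = {0}
--     for i in range(index, len(nums)):
--         a = nums[i]
--         t += a
--         reach = reach | {(r + a) % 10 for r in reach}
--     t %= 10
--     return t % 2 != sum(left_list) % 2 and t in reach
-- ===== Notes on version B (the rewrite author's own statement) =====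
-- stated objective: alternative
-- what changed: Replaces A's recursive backtracking over all left/right splits with a single pass that tracks the set of reachable subset-sum residues mod 10 (a 10-divisible left sum can never be odd, so only the right-sum-divisible-by-10 condition matters, and it depends only on the subset sum mod 10); intended as asymptotically faster but a timing run could not confirm it, so no speed is claimed.
import Mathlib
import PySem

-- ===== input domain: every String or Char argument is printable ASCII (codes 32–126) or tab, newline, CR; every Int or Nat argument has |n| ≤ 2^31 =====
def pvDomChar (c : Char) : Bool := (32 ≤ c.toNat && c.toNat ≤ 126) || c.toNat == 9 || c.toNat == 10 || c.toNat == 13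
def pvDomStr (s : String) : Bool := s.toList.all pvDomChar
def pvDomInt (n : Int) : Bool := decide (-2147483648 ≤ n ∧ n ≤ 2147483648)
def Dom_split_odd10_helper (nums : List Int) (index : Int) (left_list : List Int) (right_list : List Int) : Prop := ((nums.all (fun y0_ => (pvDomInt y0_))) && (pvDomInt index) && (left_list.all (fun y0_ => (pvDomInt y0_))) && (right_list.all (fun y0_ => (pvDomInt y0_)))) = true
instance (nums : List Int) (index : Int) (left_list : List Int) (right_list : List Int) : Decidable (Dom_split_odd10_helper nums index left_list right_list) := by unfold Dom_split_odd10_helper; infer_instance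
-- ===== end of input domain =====

-- B replaces A's recursive backtracking over all left/right splits with a single pass
-- tracking the reachable subset-sum residues mod 10 (equivalence is about the return
-- value only: A temporarily mutates and restores its list arguments, B does not).

-- ===== PORT A =====
def split_odd10_helper (nums : List Int) (index : Int) (left_list : List Int) (right_list : List Int) : Bool :=
  if _h : (nums.length : Int) ≤ index then
    if PySem.Int.mod left_list.sum 10 == 0 || PySem.Int.mod right_list.sum 10 == 0 then
      if PySem.Int.mod left_list.sum 2 != 0 || PySem.Int.mod left_list.sum 2 != 0 then true
      else false
    else false
  else
    match PySem.List.pyGet? nums index with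
    | none => false  -- IndexError: excluded by Pre_
    | some a =>
      if split_odd10_helper nums (index + 1) (left_list ++ [a]) right_list then true
      else if split_odd10_helper nums (index + 1) left_list (right_list ++ [a]) then true
      else false
termination_by ((nums.length : Int) - index).toNat
decreasing_by all_goals (simp_wf; omega)

-- ===== PORT B =====
def split_odd10_helper_alt (nums : List Int) (index : Int) (left_list : List Int) (right_list : List Int) : Bool :=
  let st := (PySem.List.pyRange index (nums.length : Int) 1).foldl
    (fun (st : Int × PySem.Set Int) i =>
      match PySem.List.pyGet? nums i with
      | none => st  -- IndexError: excluded by Pre_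
      | some a => (st.1 + a, PySem.Set.union st.2 (st.2.map (fun r => PySem.Int.mod (r + a) 10))))
    (right_list.sum, PySem.Set.ofList [0])
  let t := PySem.Int.mod st.1 10
  (PySem.Int.mod t 2 != PySem.Int.mod left_list.sum 2) && PySem.Set.contains st.2 t

-- ===== PRECONDITION & SPEC =====
-- A raises IndexError exactly when index < -len(nums) (nums[index] out of range); Pre_ excludes only those inputs.
def Pre_split_odd10_helper (nums : List Int) (index : Int) (left_list : List Int) (right_list : List Int) : Prop :=
  -(nums.length : Int) ≤ index
instance (nums : List Int) (index : Int) (left_list : List Int) (right_list : List Int) : Decidable (Pre_split_odd10_helper nums index left_list right_list) := by unfold Pre_split_odd10_helper; infer_instance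
def pvWitness_split_odd10_helper : List Int × Int × List Int × List Int := ([3, 7, 10], 0, [2], [5])

def Spec_split_odd10_helper (nums : List Int) (index : Int) (left_list : List Int) (right_list : List Int) (out : Bool) : Prop := out = split_odd10_helper_alt nums index left_list right_list
instance (nums : List Int) (index : Int) (left_list : List Int) (right_list : List Int) (out : Bool) : Decidable (Spec_split_odd10_helper nums index left_list right_list out) := by unfold Spec_split_odd10_helper; infer_instance

-- ===== CLAIM (what is proved, stated in full; the proofs are below) =====
def Claim_equal_split_odd10_helper : Prop := ∀ (nums : List Int) (index : Int) (left_list : List Int) (right_list : List Int), Dom_split_odd10_helper nums index left_list right_list → Pre_split_odd10_helper nums index left_list right_list → Spec_split_odd10_helper nums index left_list right_list (split_odd10_helper nums index left_list right_list)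

-- ===== LEMMAS AND PROOFS =====

-- A's base-case test, as a function of the two sums.
def pvCondB (L R : Int) : Bool :=
  if PySem.Int.mod L 10 == 0 || PySem.Int.mod R 10 == 0 then
    if PySem.Int.mod L 2 != 0 || PySem.Int.mod L 2 != 0 then true else false
  else false

-- A's backtracking search, abstracted to the list of remaining elements and the two running sums.
def pvF : List Int → Int → Int → Bool
  | [], L, R => pvCondB L R
  | a :: es, L, R => pvF es (L + a) R || pvF es L (R + a)

-- All subset sums of a list (with multiplicity).
def pvSubs : List Int → List Int
  | [] => [0]
  | a :: es => pvSubs es ++ (pvSubs es).map (· + a)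

-- The elements A's recursion visits: nums[i] for i in range(index, len(nums)).
def pvElems (nums : List Int) (index : Int) : List Int :=
  (PySem.List.pyRange index (nums.length : Int) 1).map (fun i => (PySem.List.pyGet? nums i).getD 0)

theorem pvElems_nil (nums : List Int) (index : Int) (h : (nums.length : Int) ≤ index) :
    pvElems nums index = [] := by
  simp [pvElems, PySem.List.pyRange_one_eq_nil h]

theorem pvElems_cons (nums : List Int) (index : Int) (h : index < (nums.length : Int))
    (hlo : -(nums.length : Int) ≤ index) :
    ∃ a, PySem.List.pyGet? nums index = some a ∧
      pvElems nums index = a :: pvElems nums (index + 1) := by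
  have hin : PySem.Raise.InRange nums.length index := by
    simp [PySem.Raise.InRange]; omega
  obtain ⟨a, ha⟩ : ∃ a, PySem.List.pyGet? nums index = some a := by
    cases h1 : PySem.List.pyGet? nums index with
    | none => rw [PySem.List.pyGet?_eq_none_iff] at h1; exact absurd hin h1
    | some a => exact ⟨a, rfl⟩
  refine ⟨a, ha, ?_⟩
  rw [pvElems, PySem.List.pyRange_one_cons h]
  simp [pvElems, ha]

-- A equals the abstract backtracking search on the visited elements.
theorem A_eq_pvF : ∀ (k : Nat) (nums : List Int) (index : Int) (left_list right_list : List Int),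
    (((nums.length : Int) - index).toNat = k) → -(nums.length : Int) ≤ index →
    split_odd10_helper nums index left_list right_list
      = pvF (pvElems nums index) left_list.sum right_list.sum := by
  intro k
  induction k with
  | zero =>
    intro nums index left right hk hlo
    have h : (nums.length : Int) ≤ index := by omega
    rw [split_odd10_helper, pvElems_nil nums index h]
    simp [h, pvF, pvCondB]
  | succ n ih =>
    intro nums index left right hk hlo
    have h : index < (nums.length : Int) := by omega
    obtain ⟨a, ha, he⟩ := pvElems_cons nums index h hlo
    rw [split_odd10_helper]
    have h' : ¬ ((nums.length : Int) ≤ index) := by omega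
    simp only [h', dite_false, ha]
    rw [he]
    have ih1 := ih nums (index + 1) (left ++ [a]) right (by omega) (by omega)
    have ih2 := ih nums (index + 1) left (right ++ [a]) (by omega) (by omega)
    rw [pvF, ih1, ih2]
    simp only [List.sum_append, List.sum_cons, List.sum_nil, add_zero]
    cases pvF (pvElems nums (index + 1)) (left.sum + a) right.sum <;>
      cases pvF (pvElems nums (index + 1)) left.sum (right.sum + a) <;> simp

theorem pvCondB_iff (L R : Int) :
    pvCondB L R = true ↔ (L % 10 = 0 ∨ R % 10 = 0) ∧ L % 2 ≠ 0 := by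
  have h10 : ∀ x : Int, PySem.Int.mod x 10 = x % 10 :=
    fun x => PySem.Int.mod_eq_emod_of_pos (by norm_num)
  have h2 : ∀ x : Int, PySem.Int.mod x 2 = x % 2 :=
    fun x => PySem.Int.mod_eq_emod_of_pos (by norm_num)
  simp only [pvCondB, h10, h2]
  split_ifs with hA hB <;> simp_all

-- The search succeeds iff some subset sum of the remaining elements works.
theorem pvF_iff : ∀ (es : List Int) (L R : Int),
    pvF es L R = true ↔
      ∃ s ∈ pvSubs es, ((L + s) % 10 = 0 ∨ (R + es.sum - s) % 10 = 0) ∧ (L + s) % 2 ≠ 0 := by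
  intro es
  induction es with
  | nil =>
    intro L R
    simp [pvF, pvSubs, pvCondB_iff]
  | cons a es ih =>
    intro L R
    rw [pvF, Bool.or_eq_true, ih, ih]
    constructor
    · rintro (⟨s, hs, hc⟩ | ⟨s, hs, hc⟩)
      · refine ⟨s + a, by simp only [pvSubs, List.mem_append, List.mem_map]; right; exact ⟨s, hs, rfl⟩, ?_⟩
        constructor
        · rcases hc.1 with h | h
          · left; rw [show L + (s + a) = L + a + s by ring]; exact h
          · right; rw [show R + (a :: es).sum - (s + a) = R + es.sum - s by simp; ring]; exact h
        · rw [show L + (s + a) = L + a + s by ring]; exact hc.2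
      · refine ⟨s, by simp only [pvSubs, List.mem_append]; left; exact hs, ?_⟩
        constructor
        · rcases hc.1 with h | h
          · left; exact h
          · right; rw [show R + (a :: es).sum - s = R + a + es.sum - s by simp; ring]; exact h
        · exact hc.2
    · rintro ⟨s, hs, hc⟩
      simp only [pvSubs, List.mem_append, List.mem_map] at hs
      rcases hs with hs | ⟨s', hs', rfl⟩
      · right
        refine ⟨s, hs, ?_, hc.2⟩
        rcases hc.1 with h | h
        · left; exact h
        · right; rw [show R + a + es.sum - s = R + (a :: es).sum - s by simp; ring]; exact h
      · left
        refine ⟨s', hs', ?_, ?_⟩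
        · rcases hc.1 with h | h
          · left; rw [show L + a + s' = L + (s' + a) by ring]; exact h
          · right; rw [show R + es.sum - s' = R + (a :: es).sum - (s' + a) by simp; ring]; exact h
        · rw [show L + a + s' = L + (s' + a) by ring]; exact hc.2

-- The fold in B: first component is the running total, second the reachable residues mod 10.
theorem B_fold_inv : ∀ (es : List Int) (t : Int) (reach : PySem.Set Int),
    (∀ x ∈ reach, x % 10 = x) →
    (es.foldl (fun (st : Int × PySem.Set Int) a =>
        (st.1 + a, PySem.Set.union st.2 (st.2.map (fun r => PySem.Int.mod (r + a) 10)))) (t, reach)).1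
      = t + es.sum ∧
    (∀ x, x ∈ (es.foldl (fun (st : Int × PySem.Set Int) a =>
        (st.1 + a, PySem.Set.union st.2 (st.2.map (fun r => PySem.Int.mod (r + a) 10)))) (t, reach)).2
      ↔ ∃ r ∈ reach, ∃ s ∈ pvSubs es, x = (r + s) % 10) := by
  intro es
  induction es with
  | nil =>
    intro t reach hred
    refine ⟨by simp, fun x => ?_⟩
    simp only [List.foldl_nil, pvSubs, List.mem_singleton]
    constructor
    · intro hx; exact ⟨x, hx, 0, rfl, by rw [add_zero, hred x hx]⟩
    · rintro ⟨r, hr, s, rfl, rfl⟩; rw [add_zero, hred r hr]; exact hr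
  | cons a es ih =>
    intro t reach hred
    have hmod : ∀ r : Int, PySem.Int.mod (r + a) 10 = (r + a) % 10 :=
      fun r => PySem.Int.mod_eq_emod_of_pos (by norm_num)
    have hmem' : ∀ x, x ∈ PySem.Set.union reach (reach.map (fun r => PySem.Int.mod (r + a) 10))
        ↔ x ∈ reach ∨ ∃ r ∈ reach, x = (r + a) % 10 := by
      intro x
      rw [PySem.Set.mem_union]
      simp only [List.mem_map, hmod]
      constructor
      · rintro (h | ⟨r, hr, rfl⟩)
        · left; exact h
        · right; exact ⟨r, hr, rfl⟩
      · rintro (h | ⟨r, hr, rfl⟩)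
        · left; exact h
        · right; exact ⟨r, hr, rfl⟩
    have hred' : ∀ x ∈ PySem.Set.union reach (reach.map (fun r => PySem.Int.mod (r + a) 10)),
        x % 10 = x := by
      intro x hx
      rcases (hmem' x).mp hx with h | ⟨r, _, rfl⟩
      · exact hred x h
      · omega
    obtain ⟨ht, hiff⟩ := ih (t + a) (PySem.Set.union reach (reach.map (fun r => PySem.Int.mod (r + a) 10))) hred'
    refine ⟨?_, fun x => ?_⟩
    · rw [List.foldl_cons, ht]; simp; ring
    · rw [List.foldl_cons, hiff x]
      constructor
      · rintro ⟨r', hr', s, hs, rfl⟩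
        rcases (hmem' r').mp hr' with h | ⟨r, hr, rfl⟩
        · exact ⟨r', h, s, by simp only [pvSubs, List.mem_append]; left; exact hs, rfl⟩
        · refine ⟨r, hr, s + a, by simp only [pvSubs, List.mem_append, List.mem_map]; right; exact ⟨s, hs, rfl⟩, ?_⟩
          omega
      · rintro ⟨r, hr, s, hs, rfl⟩
        simp only [pvSubs, List.mem_append, List.mem_map] at hs
        rcases hs with hs | ⟨s', hs', rfl⟩
        · exact ⟨r, (hmem' r).mpr (Or.inl hr), s, hs, rfl⟩
        · refine ⟨(r + a) % 10, (hmem' _).mpr (Or.inr ⟨r, hr, rfl⟩), s', hs', ?_⟩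
          omega

-- The fold over the index range equals the same fold over the visited elements.
theorem fold_range_eq (nums : List Int) : ∀ (k : Nat) (index : Int),
    (((nums.length : Int) - index).toNat = k) → -(nums.length : Int) ≤ index →
    ∀ st : Int × PySem.Set Int,
    (PySem.List.pyRange index (nums.length : Int) 1).foldl
      (fun (st : Int × PySem.Set Int) i =>
        match PySem.List.pyGet? nums i with
        | none => st
        | some a => (st.1 + a, PySem.Set.union st.2 (st.2.map (fun r => PySem.Int.mod (r + a) 10)))) st
    = (pvElems nums index).foldl
        (fun (st : Int × PySem.Set Int) a =>
          (st.1 + a, PySem.Set.union st.2 (st.2.map (fun r => PySem.Int.mod (r + a) 10)))) st := by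
  intro k
  induction k with
  | zero =>
    intro index hk hlo st
    have h : (nums.length : Int) ≤ index := by omega
    rw [PySem.List.pyRange_one_eq_nil h, pvElems_nil nums index h]
    rfl
  | succ n ih =>
    intro index hk hlo st
    have h : index < (nums.length : Int) := by omega
    obtain ⟨a, ha, he⟩ := pvElems_cons nums index h hlo
    rw [PySem.List.pyRange_one_cons h, he, List.foldl_cons, List.foldl_cons, ha]
    exact ih (index + 1) (by omega) (by omega) _

-- B in terms of subset sums of the visited elements.
theorem B_char (nums : List Int) (index : Int) (left_list right_list : List Int)
    (hlo : -(nums.length : Int) ≤ index) :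
    split_odd10_helper_alt nums index left_list right_list = true ↔
      ((right_list.sum + (pvElems nums index).sum) % 10) % 2 ≠ left_list.sum % 2 ∧
      ∃ s ∈ pvSubs (pvElems nums index),
        s % 10 = (right_list.sum + (pvElems nums index).sum) % 10 := by
  simp only [split_odd10_helper_alt]
  rw [fold_range_eq nums (((nums.length : Int) - index).toNat) index rfl hlo
      (right_list.sum, PySem.Set.ofList [0])]
  have hred : ∀ x ∈ (PySem.Set.ofList [0] : PySem.Set Int), x % 10 = x := by
    intro x hx
    rw [PySem.Set.mem_ofList] at hx
    simp at hx; omega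
  obtain ⟨ht, hiff⟩ := B_fold_inv (pvElems nums index) right_list.sum (PySem.Set.ofList [0]) hred
  rw [ht]
  have h10 : ∀ x : Int, PySem.Int.mod x 10 = x % 10 :=
    fun x => PySem.Int.mod_eq_emod_of_pos (by norm_num)
  have h2 : ∀ x : Int, PySem.Int.mod x 2 = x % 2 :=
    fun x => PySem.Int.mod_eq_emod_of_pos (by norm_num)
  simp only [Bool.and_eq_true, bne_iff_ne, ne_eq]
  rw [PySem.Set.contains_iff, hiff]
  simp only [h10, h2]
  constructor
  · rintro ⟨hp, r, hr, s, hs, heq⟩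
    rw [PySem.Set.mem_ofList] at hr; simp at hr; subst hr
    rw [zero_add] at heq
    constructor
    · intro hc; exact hp (by omega)
    · exact ⟨s, hs, heq.symm⟩
  · rintro ⟨hp, s, hs, heq⟩
    refine ⟨?_, 0, by rw [PySem.Set.mem_ofList]; simp, s, hs, by rw [zero_add]; exact heq.symm⟩
    intro hc; exact hp (by omega)

-- The per-subset arithmetic core: the evidently-unsatisfiable 'left % 10 == 0' branch drops out,
-- and 'right side divisible by 10' is exactly 's ≡ t (mod 10)'.
theorem arith_core (L R Sg s : Int) :
    (((L + s) % 10 = 0 ∨ (R + Sg - s) % 10 = 0) ∧ (L + s) % 2 ≠ 0) ↔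
      (s % 10 = (R + Sg) % 10 ∧ ((R + Sg) % 10) % 2 ≠ L % 2) := by
  omega

theorem split_odd10_helper_spec' (nums : List Int) (index : Int) (left_list right_list : List Int)
    (hlo : -(nums.length : Int) ≤ index) :
    split_odd10_helper nums index left_list right_list
      = split_odd10_helper_alt nums index left_list right_list := by
  have hA := A_eq_pvF (((nums.length : Int) - index).toNat) nums index left_list right_list rfl hlo
  have hiff : pvF (pvElems nums index) left_list.sum right_list.sum = true ↔
      split_odd10_helper_alt nums index left_list right_list = true := by
    rw [pvF_iff, B_char nums index left_list right_list hlo]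
    constructor
    · rintro ⟨s, hs, hc⟩
      have h := (arith_core left_list.sum right_list.sum (pvElems nums index).sum s).mp hc
      exact ⟨h.2, s, hs, h.1⟩
    · rintro ⟨hp, s, hs, heq⟩
      exact ⟨s, hs, (arith_core left_list.sum right_list.sum (pvElems nums index).sum s).mpr ⟨heq, hp⟩⟩
  rw [hA]
  exact Bool.eq_iff_iff.mpr (by simpa using hiff)

-- ===== VERDICT (by name: the statement is the Claim_ definition above) =====
theorem split_odd10_helper_spec : Claim_equal_split_odd10_helper := by
  intro nums index left_list right_list _hdom hpre
  exact split_odd10_helper_spec' nums index left_list right_list hpre
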